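-- pv_equiv track=rewrite | github.com/bharatagarwal/bctci | 36.01-adjacency-list-validation-book.py | validate
-- ===== SOURCE A (Python) =====
-- def validate(graph):
--     V = len(graph)
--
--     for node in range(V):
--         seen = set()
--
--         for neighbor in graph[node]:
--             if neighbor < 0 or neighbor >= V:
--                 return False
--             if neighbor == node:
--                 return False
--             if neighbor in seen:
--                 return False
--             seen.add(neighbor)
--
--     edges = set()
--
--     for node1 in range(V):
--         for node2 in graph[node1]:
--             # normalising so that duplicates are represented the same
--             edge = (min(node1, node2), max(node1, node2))
--             if edge in edges:
--                 edges.remove(edge)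
--             else:
--                 edges.add(edge)
--
--     return len(edges) == 0
--
-- graph = [[1], []]
-- ===== SOURCE B (Python) =====
-- def validate(graph):
--     # One pass with per-node neighbor sets: duplicate check by set size,
--     # symmetry by reverse membership lookup instead of A's edge-toggle set.
--     V = len(graph)
--     adj = [set(nbrs) for nbrs in graph]
--     for i, (nbrs, s) in enumerate(zip(graph, adj)):
--         if len(s) != len(nbrs):
--             return False
--         for nb in nbrs:
--             if nb < 0 or nb >= V or nb == i or i not in adj[nb]:
--                 return False
--     return True
-- ===== Notes on version B (the rewrite author's own statement) =====
-- stated objective: alternative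
-- what changed: A's second pass toggles normalized (min,max) edges in a single set and tests that it empties; B instead makes one pass that checks duplicates by per-node set size and checks symmetry by a reverse-membership lookup (i in adj[nb]) in precomputed per-node neighbor sets, with no edge accumulator.
import Mathlib
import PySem

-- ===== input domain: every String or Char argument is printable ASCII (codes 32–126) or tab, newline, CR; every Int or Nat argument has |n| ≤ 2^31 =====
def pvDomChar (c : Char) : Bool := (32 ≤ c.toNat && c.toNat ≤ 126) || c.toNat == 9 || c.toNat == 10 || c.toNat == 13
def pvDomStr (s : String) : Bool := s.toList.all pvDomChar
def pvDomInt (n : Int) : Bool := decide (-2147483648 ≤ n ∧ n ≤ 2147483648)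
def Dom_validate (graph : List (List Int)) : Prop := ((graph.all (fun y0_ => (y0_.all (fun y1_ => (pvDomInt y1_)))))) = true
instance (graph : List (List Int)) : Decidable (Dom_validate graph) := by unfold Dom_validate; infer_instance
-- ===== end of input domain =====

-- B replaces A's normalized-edge toggling pass by a single pass with per-node
-- neighbor sets and reverse-membership lookups (objective: alternative/simpler).

-- ===== PORT A =====
-- inner loop over graph[node]; Python's early 'return False' becomes the Bool result
def pass1Inner (V node : Int) : List Int → PySem.Set Int → Bool
  | [], _ => true
  | nb :: rest, seen =>
    if nb < 0 ∨ V ≤ nb then false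
    else if nb = node then false
    else if PySem.Set.contains seen nb then false
    else pass1Inner V node rest (PySem.Set.add seen nb)

-- Python's edges.remove(edge) only runs when edge ∈ edges, where discard is exact
def toggleEdge (edges : PySem.Set (Int × Int)) (e : Int × Int) : PySem.Set (Int × Int) :=
  if PySem.Set.contains edges e then PySem.Set.discard edges e else PySem.Set.add edges e

def validate (graph : List (List Int)) : Bool :=
  -- 'for node in range(V): … graph[node]' iterates exactly the (index, row) pairs
  if (PySem.List.enumerate graph 0).all
      (fun p => pass1Inner (graph.length : Int) p.1 p.2 PySem.Set.empty) then
    (((PySem.List.enumerate graph 0).foldl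
        (fun edges p =>
          p.2.foldl (fun edges node2 => toggleEdge edges (min p.1 node2, max p.1 node2)) edges)
        (PySem.Set.empty : PySem.Set (Int × Int))).length == 0)
  else false

-- ===== PORT B =====
def adjSets (graph : List (List Int)) : List (PySem.Set Int) :=
  graph.map (fun nbrs => PySem.Set.ofList nbrs)

def validate_alt (graph : List (List Int)) : Bool :=
  (PySem.List.enumerate (graph.zip (adjSets graph)) 0).all (fun p =>
    (PySem.Set.len p.2.2 == (p.2.1.length : Int)) &&
    p.2.1.all (fun nb =>
      !(decide (nb < 0) || decide ((graph.length : Int) ≤ nb) || (nb == p.1) ||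
        !(match PySem.List.pyGet? (adjSets graph) nb with
          | some s => PySem.Set.contains s p.1
          | none => false))))  -- none is unreachable: nb is range-checked before the lookup

-- ===== PRECONDITION & SPEC =====
def Spec_validate (graph : List (List Int)) (out : Bool) : Prop := out = validate_alt graph
instance (graph : List (List Int)) (out : Bool) : Decidable (Spec_validate graph out) := by unfold Spec_validate; infer_instance

-- ===== CLAIM (what is proved, stated in full; the proofs are below) =====
def Claim_equal_validate : Prop := ∀ (graph : List (List Int)), Dom_validate graph → Spec_validate graph (validate graph)

-- ===== LEMMAS AND PROOFS =====

-- semantic characterisations used only by the proofs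
def GoodRow (V i : Int) (l : List Int) : Prop :=
  l.Nodup ∧ ∀ nb ∈ l, 0 ≤ nb ∧ nb < V ∧ nb ≠ i

def Good (g : List (List Int)) : Prop :=
  ∀ (k : Nat) (h : k < g.length), GoodRow (g.length : Int) (k : Int) g[k]

def rowAt (g : List (List Int)) (a : Int) : List Int :=
  if 0 ≤ a then g.getD a.toNat [] else []

def SymG (g : List (List Int)) : Prop :=
  ∀ (k : Nat) (h : k < g.length), ∀ nb ∈ g[k], (k : Int) ∈ rowAt g nb

def allE (g : List (List Int)) : List (Int × Int) :=
  (PySem.List.enumerate g 0).flatMap (fun p => p.2.map (fun nb => (min p.1 nb, max p.1 nb)))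

theorem pass1Inner_eq_true (V node : Int) (l : List Int) (seen : PySem.Set Int) :
    pass1Inner V node l seen = true ↔
      ((∀ nb ∈ l, 0 ≤ nb ∧ nb < V ∧ nb ≠ node) ∧ l.Nodup ∧ ∀ nb ∈ l, nb ∉ seen) := by
  induction l generalizing seen with
  | nil => simp [pass1Inner]
  | cons nb rest ih =>
    rw [pass1Inner]
    by_cases h1 : nb < 0 ∨ V ≤ nb
    · simp only [if_pos h1, Bool.false_eq_true, false_iff]
      rintro ⟨hall, -, -⟩
      have := hall nb (List.mem_cons_self)
      omega
    · rw [if_neg h1]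
      by_cases h2 : nb = node
      · simp only [if_pos h2, Bool.false_eq_true, false_iff]
        rintro ⟨hall, -, -⟩
        exact (hall nb List.mem_cons_self).2.2 h2
      · rw [if_neg h2]
        by_cases h3 : PySem.Set.contains seen nb = true
        · simp only [if_pos h3, Bool.false_eq_true, false_iff]
          rintro ⟨-, -, hns⟩
          exact hns nb List.mem_cons_self ((PySem.Set.contains_iff _ _).mp h3)
        · rw [if_neg h3, ih]
          have hb1 : (0 : Int) ≤ nb := by omega
          have hb2 : nb < V := by omega
          have hnbseen : nb ∉ seen := fun hm => h3 ((PySem.Set.contains_iff _ _).mpr hm)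
          simp only [List.mem_cons, List.nodup_cons, PySem.Set.mem_add]
          constructor
          · rintro ⟨hall, hnd, hns⟩
            refine ⟨?_, ⟨fun hmem => (hns nb hmem) (Or.inr rfl), hnd⟩, ?_⟩
            · rintro x (rfl | hx)
              · exact ⟨hb1, hb2, h2⟩
              · exact hall x hx
            · rintro x (rfl | hx)
              · exact hnbseen
              · intro hs
                exact hns x hx (Or.inl hs)
          · rintro ⟨hall, ⟨hnin, hnd⟩, hseen⟩
            refine ⟨fun x hx => hall x (Or.inr hx), hnd, ?_⟩
            intro x hx hmem
            rcases hmem with hs | rfl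
            · exact hseen x (Or.inr hx) hs
            · exact hnin hx

theorem passA_iff_Good (g : List (List Int)) :
    ((PySem.List.enumerate g 0).all
      (fun p => pass1Inner (g.length : Int) p.1 p.2 PySem.Set.empty)) = true ↔ Good g := by
  rw [List.all_eq_true]
  constructor
  · intro h k hk
    have hm : ((k : Int), g[k]) ∈ PySem.List.enumerate g 0 := by
      rw [PySem.List.mem_enumerate_iff]
      exact ⟨k, hk, by simp⟩
    have := h _ hm
    rw [pass1Inner_eq_true] at this
    exact ⟨this.2.1, this.1⟩
  · intro h p hp
    rw [PySem.List.mem_enumerate_iff] at hp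
    obtain ⟨k, hk, rfl⟩ := hp
    rw [pass1Inner_eq_true]
    refine ⟨fun nb hnb => ?_, (h k hk).1, by simp [PySem.Set.empty]⟩
    have := (h k hk).2 nb (by simpa using hnb)
    simpa using this

theorem mem_toggleEdge (s : PySem.Set (Int × Int)) (e x : Int × Int) :
    x ∈ toggleEdge s e ↔ (x = e ∧ x ∉ s) ∨ (x ≠ e ∧ x ∈ s) := by
  unfold toggleEdge
  by_cases h : PySem.Set.contains s e = true
  · have he : e ∈ s := (PySem.Set.contains_iff _ _).mp h
    rw [if_pos h, PySem.Set.mem_discard]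
    by_cases hx : x = e
    · subst hx; tauto
    · tauto
  · have he : e ∉ s := fun hm => h ((PySem.Set.contains_iff _ _).mpr hm)
    rw [if_neg h, PySem.Set.mem_add]
    by_cases hx : x = e
    · subst hx; tauto
    · tauto

theorem mem_foldl_toggle (L : List (Int × Int)) (s : PySem.Set (Int × Int)) (x : Int × Int) :
    x ∈ L.foldl toggleEdge s ↔ ((x ∈ s) ↔ L.count x % 2 = 0) := by
  induction L generalizing s with
  | nil => simp
  | cons a L ih =>
    rw [List.foldl_cons, ih, mem_toggleEdge, List.count_cons]
    by_cases hx : x = a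
    · subst hx
      by_cases hs : x ∈ s <;> by_cases hc : L.count x % 2 = 0 <;>
        simp [hs, hc] <;> omega
    · have hba : (a == x) = false := by simp [Ne.symm hx]
      simp [hx, hba]

theorem foldl_foldl_eq_foldl_flatMap {α β γ : Type} (l : List α) (f : α → List β)
    (g : γ → β → γ) (s : γ) :
    l.foldl (fun s p => (f p).foldl g s) s = (l.flatMap f).foldl g s := by
  induction l generalizing s with
  | nil => simp
  | cons a l ih => simp [List.flatMap_cons, List.foldl_append, ih]

theorem validateA_iff (g : List (List Int)) :
    validate g = true ↔ Good g ∧ ∀ x : Int × Int, (allE g).count x % 2 = 0 := by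
  unfold validate
  by_cases hp : ((PySem.List.enumerate g 0).all
      (fun p => pass1Inner (g.length : Int) p.1 p.2 PySem.Set.empty)) = true
  · rw [if_pos hp]
    rw [passA_iff_Good] at hp
    have hfold : (PySem.List.enumerate g 0).foldl
        (fun edges p =>
          p.2.foldl (fun edges node2 => toggleEdge edges (min p.1 node2, max p.1 node2)) edges)
        (PySem.Set.empty : PySem.Set (Int × Int)) = (allE g).foldl toggleEdge PySem.Set.empty := by
      rw [allE, ← foldl_foldl_eq_foldl_flatMap]
      congr 1
      funext edges p
      rw [List.foldl_map]
    rw [hfold]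
    have key : ∀ x : Int × Int,
        x ∈ (allE g).foldl toggleEdge PySem.Set.empty ↔ ¬ ((allE g).count x % 2 = 0) := by
      intro x; rw [mem_foldl_toggle]; simp [PySem.Set.empty]
    constructor
    · intro h
      refine ⟨hp, fun x => ?_⟩
      by_contra hx
      have hnil : (allE g).foldl toggleEdge PySem.Set.empty = [] := by
        simpa [List.length_eq_zero_iff] using h
      rw [List.eq_nil_iff_forall_not_mem] at hnil
      exact hnil x ((key x).mpr hx)
    · rintro ⟨-, h⟩
      have hnil : (allE g).foldl toggleEdge PySem.Set.empty = [] := by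
        rw [List.eq_nil_iff_forall_not_mem]
        intro x hx
        exact (key x).mp hx (h x)
      have hnil' : List.foldl toggleEdge [] (allE g) = [] := hnil
      simp [hnil']
  · rw [if_neg hp]
    simp only [Bool.false_eq_true, false_iff]
    rintro ⟨hG, -⟩
    exact hp ((passA_iff_Good g).mpr hG)

theorem norm_eq_iff (i nb a b : Int) (hab : a < b) (hne : nb ≠ i) :
    (min i nb, max i nb) = (a, b) ↔ (i = a ∧ nb = b) ∨ (i = b ∧ nb = a) := by
  rw [Prod.mk.injEq]
  rcases min_cases i nb with ⟨h1, h2⟩ | ⟨h1, h2⟩ <;>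
    rcases max_cases i nb with ⟨h3, h4⟩ | ⟨h3, h4⟩ <;> rw [h1, h3] <;> omega

theorem rowcount (V i : Int) (l : List Int) (h : GoodRow V i l) (a b : Int) (hab : a < b) :
    ((l.map (fun nb => (min i nb, max i nb))).count (a, b)) =
      ((if i = a then l.count b else 0) + (if i = b then l.count a else 0)) := by
  rw [List.count_eq_countP, List.countP_map]
  by_cases hia : i = a
  · rw [if_pos hia, if_neg (by omega), Nat.add_zero, List.count_eq_countP]
    apply List.countP_congr
    intro nb hnb
    have hne := (h.2 nb hnb).2.2
    have hiff : ((min i nb, max i nb) = (a, b)) ↔ nb = b := by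
      rw [norm_eq_iff i nb a b hab hne]; omega
    simp only [Function.comp_apply, beq_iff_eq]
    exact hiff
  · by_cases hib : i = b
    · rw [if_neg hia, if_pos hib, Nat.zero_add, List.count_eq_countP]
      apply List.countP_congr
      intro nb hnb
      have hne := (h.2 nb hnb).2.2
      have hiff : ((min i nb, max i nb) = (a, b)) ↔ nb = a := by
        rw [norm_eq_iff i nb a b hab hne]; omega
      simp only [Function.comp_apply, beq_iff_eq]
      exact hiff
    · rw [if_neg hia, if_neg hib, Nat.add_zero]
      rw [List.countP_eq_zero]
      intro nb hnb
      have hne := (h.2 nb hnb).2.2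
      simp only [Function.comp, beq_iff_eq, norm_eq_iff i nb a b hab hne]
      omega

theorem sum_enumerate_ite {α : Type} (xs : List α) (a : Int) (f : α → Nat) (d : α) : ∀ s : Int,
    ((PySem.List.enumerate xs s).map (fun p => if p.1 = a then f p.2 else 0)).sum =
      if s ≤ a ∧ a < s + xs.length then f (xs.getD (a - s).toNat d) else 0 := by
  induction xs with
  | nil =>
    intro s
    simp only [PySem.List.enumerate, List.map_nil, List.sum_nil, List.length_nil]
    rw [if_neg (by push_cast; omega)]
  | cons x xs ih =>
    intro s
    rw [PySem.List.enumerate_cons, List.map_cons, List.sum_cons, ih (s + 1)]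
    simp only [List.length_cons]
    by_cases hsa : s = a
    · rw [if_pos hsa, if_neg (by omega), if_pos (by push_cast; omega)]
      rw [hsa]
      simp
    · rw [if_neg hsa]
      by_cases hc : s + 1 ≤ a ∧ a < s + 1 + (xs.length : Int)
      · rw [if_pos hc, if_pos (by push_cast; omega)]
        have ht : (a - s).toNat = (a - (s + 1)).toNat + 1 := by omega
        rw [ht, Nat.zero_add, List.getD_cons_succ]
      · rw [if_neg hc, if_neg (by push_cast; omega), Nat.zero_add]

theorem rowAt_ite (g : List (List Int)) (c : Int) (f : List Int → Nat) (hf : f [] = 0) :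
    (if (0 : Int) ≤ c ∧ c < 0 + (g.length : Int) then f (g.getD (c - 0).toNat []) else 0)
      = f (rowAt g c) := by
  unfold rowAt
  by_cases h : (0 : Int) ≤ c ∧ c < (g.length : Int)
  · rw [if_pos (by omega), if_pos h.1]
    congr 2
    omega
  · rw [if_neg (by omega)]
    by_cases h0 : (0 : Int) ≤ c
    · rw [if_pos h0, List.getD_eq_default, hf]
      omega
    · rw [if_neg h0, hf]

theorem count_allE (g : List (List Int)) (hG : Good g) (a b : Int) (hab : a < b) :
    (allE g).count (a, b) = (rowAt g a).count b + (rowAt g b).count a := by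
  unfold allE
  rw [List.count_flatMap]
  have hpt : ∀ p ∈ PySem.List.enumerate g 0,
      (List.count (a, b) ∘ fun p : Int × List Int => p.2.map fun nb => (min p.1 nb, max p.1 nb)) p
        = ((if p.1 = a then p.2.count b else 0) + (if p.1 = b then p.2.count a else 0)) := by
    intro p hp
    rw [PySem.List.mem_enumerate_iff] at hp
    obtain ⟨k, hk, rfl⟩ := hp
    simp only [Function.comp]
    exact rowcount (g.length : Int) _ _ (by simpa using hG k hk) a b hab
  rw [List.map_congr_left hpt, List.sum_map_add,
    sum_enumerate_ite g a (fun l => l.count b) [] 0,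
    sum_enumerate_ite g b (fun l => l.count a) [] 0,
    rowAt_ite g a (fun l => l.count b) (by simp),
    rowAt_ite g b (fun l => l.count a) (by simp)]

theorem rowAt_of_lt (g : List (List Int)) (k : Nat) (hk : k < g.length) :
    rowAt g (k : Int) = g[k] := by
  unfold rowAt
  rw [if_pos (Int.natCast_nonneg k)]
  simp [List.getD_eq_getElem?_getD, List.getElem?_eq_getElem hk]

theorem parity_iff_sym (g : List (List Int)) (hG : Good g) :
    (∀ x : Int × Int, (allE g).count x % 2 = 0) ↔ SymG g := by
  constructor
  · intro hpar k hk nb hnb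
    obtain ⟨hnd, hrange⟩ := hG k hk
    obtain ⟨h0, hV, hne⟩ := hrange nb hnb
    rcases lt_or_gt_of_ne hne with hlt | hgt
    · have hcount := hpar (nb, (k : Int))
      rw [count_allE g hG nb (k : Int) hlt, rowAt_of_lt g k hk,
        List.count_eq_one_of_mem hnd hnb] at hcount
      exact List.count_pos_iff.mp (by omega)
    · have hcount := hpar ((k : Int), nb)
      rw [count_allE g hG (k : Int) nb hgt, rowAt_of_lt g k hk,
        List.count_eq_one_of_mem hnd hnb] at hcount
      exact List.count_pos_iff.mp (by omega)
  · rintro hsym ⟨a, b⟩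
    by_cases hmem : (a, b) ∈ allE g
    · unfold allE at hmem
      rw [List.mem_flatMap] at hmem
      obtain ⟨p, hp, hmm⟩ := hmem
      rw [PySem.List.mem_enumerate_iff] at hp
      obtain ⟨k, hk, rfl⟩ := hp
      rw [List.mem_map] at hmm
      obtain ⟨nb, hnb, heq⟩ := hmm
      obtain ⟨hnd, hrange⟩ := hG k hk
      obtain ⟨h0, hV, hne⟩ := hrange nb hnb
      simp only [zero_add, Prod.mk.injEq] at heq
      obtain ⟨ha, hb⟩ := heq
      have h5 := min_le_left ((k : Int)) nb
      have h6 := min_le_right ((k : Int)) nb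
      have h7 := le_max_left ((k : Int)) nb
      have h8 := le_max_right ((k : Int)) nb
      have h9 := min_choice ((k : Int)) nb
      have h10 := max_choice ((k : Int)) nb
      have hkI : (k : Int) < g.length := by exact_mod_cast hk
      have hab : a < b := by omega
      have ha0 : (0 : Int) ≤ a := by omega
      have haV : a < (g.length : Int) := by omega
      have hb0 : (0 : Int) ≤ b := by omega
      have hbV : b < (g.length : Int) := by omega
      have hka : a.toNat < g.length := by omega
      have hkb : b.toNat < g.length := by omega
      have hrowa : rowAt g a = g[a.toNat] := by
        have := rowAt_of_lt g a.toNat hka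
        rwa [Int.toNat_of_nonneg ha0] at this
      have hrowb : rowAt g b = g[b.toNat] := by
        have := rowAt_of_lt g b.toNat hkb
        rwa [Int.toNat_of_nonneg hb0] at this
      rw [count_allE g hG a b hab]
      by_cases hm1 : b ∈ rowAt g a
      · have h1 : (rowAt g a).count b = 1 := by
          rw [hrowa] at hm1 ⊢
          exact List.count_eq_one_of_mem (hG a.toNat hka).1 hm1
        have hm2 : a ∈ rowAt g b := by
          have := hsym a.toNat hka b (by rwa [hrowa] at hm1)
          rwa [Int.toNat_of_nonneg ha0] at this
        have h2 : (rowAt g b).count a = 1 := by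
          rw [hrowb] at hm2 ⊢
          exact List.count_eq_one_of_mem (hG b.toNat hkb).1 hm2
        rw [h1, h2]
      · have hm2 : a ∉ rowAt g b := by
          intro hm2
          apply hm1
          have := hsym b.toNat hkb a (by rwa [hrowb] at hm2)
          rwa [Int.toNat_of_nonneg hb0] at this
        rw [List.count_eq_zero.mpr hm1, List.count_eq_zero.mpr hm2]
    · rw [List.count_eq_zero.mpr hmem]

theorem ofList_sublist (l : List Int) : (PySem.Set.ofList l).Sublist l := by
  induction l with
  | nil => simp [PySem.Set.ofList]
  | cons x xs ih =>
    rw [PySem.Set.ofList_cons]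
    exact List.Sublist.cons₂ x (List.filter_sublist.trans ih)

theorem setlen_iff_nodup (l : List Int) :
    ((PySem.Set.len (PySem.Set.ofList l) == (l.length : Int)) = true) ↔ l.Nodup := by
  rw [beq_iff_eq]
  unfold PySem.Set.len
  rw [Nat.cast_inj]
  constructor
  · intro h
    have heq := List.Sublist.eq_of_length (ofList_sublist l) h
    rw [← heq]
    exact PySem.Set.nodup_ofList l
  · intro h
    rw [PySem.Set.ofList_eq_self_of_nodup l h]

theorem pyGet_adj (g : List (List Int)) (nb : Int) (h0 : 0 ≤ nb) (hV : nb < (g.length : Int)) :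
    PySem.List.pyGet? (adjSets g) nb = some (PySem.Set.ofList (g.getD nb.toNat [])) := by
  obtain ⟨m, rfl⟩ : ∃ m : Nat, nb = (m : Int) := ⟨nb.toNat, by omega⟩
  rw [PySem.List.pyGet?_natCast]
  have hlt : m < g.length := by omega
  have h1 : (adjSets g)[m]? = some (PySem.Set.ofList g[m]) := by
    simp [adjSets, List.getElem?_eq_getElem hlt]
  rw [h1, Int.toNat_natCast, List.getD_eq_getElem g [] hlt]

theorem perNb (g : List (List Int)) (k : Nat) (nb : Int) :
    ((!(decide (nb < 0) || decide ((g.length : Int) ≤ nb) || (nb == (k : Int)) ||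
        !(match PySem.List.pyGet? (adjSets g) nb with
          | some s => PySem.Set.contains s (k : Int)
          | none => false))) = true)
      ↔ (0 ≤ nb ∧ nb < (g.length : Int) ∧ nb ≠ (k : Int) ∧ (k : Int) ∈ rowAt g nb) := by
  by_cases hr : 0 ≤ nb ∧ nb < (g.length : Int)
  · rw [pyGet_adj g nb hr.1 hr.2]
    have hrow : rowAt g nb = g.getD nb.toNat [] := by unfold rowAt; rw [if_pos hr.1]
    simp only [Bool.not_eq_eq_eq_not, Bool.not_true, Bool.or_eq_false_iff,
      decide_eq_false_iff_not, not_lt, not_le, beq_eq_false_iff_ne, ne_eq,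
      Bool.not_false, PySem.Set.contains_iff, PySem.Set.mem_ofList, hrow]
    constructor
    · rintro ⟨⟨⟨-, h2⟩, h3⟩, h4⟩
      exact ⟨hr.1, h2, h3, h4⟩
    · rintro ⟨-, h2, h3, h4⟩
      exact ⟨⟨⟨by omega, h2⟩, h3⟩, h4⟩
  · constructor
    · intro h
      exfalso
      simp only [Bool.not_eq_eq_eq_not, Bool.not_true, Bool.or_eq_false_iff,
        decide_eq_false_iff_not, not_lt, not_le] at h
      exact hr ⟨h.1.1.1, h.1.1.2⟩
    · rintro ⟨h1, h2, -, -⟩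
      exact absurd ⟨h1, h2⟩ hr

theorem validateB_iff (g : List (List Int)) : validate_alt g = true ↔ Good g ∧ SymG g := by
  have hlen : (g.zip (adjSets g)).length = g.length := by simp [adjSets]
  unfold validate_alt
  rw [List.all_eq_true]
  have hzip : ∀ (k : Nat) (hk : k < g.length),
      (g.zip (adjSets g))[k]'(by omega) = (g[k], PySem.Set.ofList g[k]) := by
    intro k hk
    simp [adjSets, List.getElem_zip]
  constructor
  · intro h
    have hk : ∀ (k : Nat) (hk : k < g.length),
        ((PySem.Set.len (PySem.Set.ofList g[k]) == ((g[k]).length : Int)) &&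
          (g[k]).all (fun nb =>
            !(decide (nb < 0) || decide ((g.length : Int) ≤ nb) || (nb == (k : Int)) ||
              !(match PySem.List.pyGet? (adjSets g) nb with
                | some s => PySem.Set.contains s (k : Int)
                | none => false)))) = true := by
      intro k hkk
      have hm : ((k : Int), (g[k], PySem.Set.ofList g[k])) ∈
          PySem.List.enumerate (g.zip (adjSets g)) 0 := by
        rw [PySem.List.mem_enumerate_iff]
        exact ⟨k, by omega, by rw [hzip k hkk]; simp⟩
      have := h _ hm
      simpa using this
    constructor
    · intro k hkk
      have := hk k hkk
      rw [Bool.and_eq_true, List.all_eq_true] at this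
      refine ⟨(setlen_iff_nodup _).mp this.1, fun nb hnb => ?_⟩
      have := (perNb g k nb).mp (this.2 nb hnb)
      exact ⟨this.1, this.2.1, this.2.2.1⟩
    · intro k hkk nb hnb
      have := hk k hkk
      rw [Bool.and_eq_true, List.all_eq_true] at this
      exact ((perNb g k nb).mp (this.2 nb hnb)).2.2.2
  · rintro ⟨hGood, hSym⟩ p hp
    rw [PySem.List.mem_enumerate_iff] at hp
    obtain ⟨k, hkk, rfl⟩ := hp
    have hkg : k < g.length := by omega
    rw [hzip k hkg]
    rw [Bool.and_eq_true, List.all_eq_true]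
    constructor
    · simpa using (setlen_iff_nodup (g[k]'hkg)).mpr (hGood k hkg).1
    · intro nb hnb
      have h1 := (hGood k hkg).2 nb hnb
      have h2 := hSym k hkg nb hnb
      simpa using (perNb g k nb).mpr ⟨h1.1, h1.2.1, h1.2.2, h2⟩

-- ===== VERDICT (by name: the statement is the Claim_ definition above) =====
theorem validate_spec : Claim_equal_validate := by
  intro graph _
  unfold Spec_validate
  rw [Bool.eq_iff_iff, validateA_iff, validateB_iff]
  by_cases hG : Good graph
  · rw [parity_iff_sym graph hG]
  · tauto
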